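-- pv_equiv track=rewrite | github.com/Keshawa96/CodilityPractice | Mindistinct.py | solution
-- ===== SOURCE A (Python) =====
-- from collections import Counter
--
-- def solution(A, K):
--     freq = Counter(A)  # Count occurrences of each number
--     sorted_freq = sorted(freq.items(), key=lambda x: x[1])  # Sort by frequency (low to high)
--
--     distinct_count = len(sorted_freq)  # Initial distinct elements count
--
--     for num, count in sorted_freq:
--         if K >= count:
--             K -= count
--             distinct_count -= 1  # Reduce distinct count
--         else:
--             break  # Stop if we can't remove an entire group
--
--     return distinct_count
-- ===== SOURCE B (Python) =====
-- from collections import Counter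
--
-- def solution(A, K):
--     freq = Counter(A)
--     ff = Counter(freq.values())  # how many groups have each frequency
--     distinct = len(freq)
--     for f in sorted(ff):  # distinct frequencies in increasing order (at most O(sqrt(n)) of them)
--         m = ff[f]
--         if K < f:
--             break
--         t = min(m, K // f)
--         distinct -= t
--         K -= t * f
--         if t < m:
--             break
--     return distinct
-- ===== Notes on version B (the rewrite author's own statement) =====
-- stated objective: alternative
-- what changed: Instead of sorting the whole frequency table (one entry per distinct element) and walking it group by group, B builds a count-of-counts table, sorts only the distinct frequencies (at most O(sqrt(n)) of them) and removes each whole frequency class at once with integer division; intended as faster, but a timing run read between ~1.4x and ~1.7x across runs, around its 1.5x confirmation bar, so no speed is claimed.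
import Mathlib
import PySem

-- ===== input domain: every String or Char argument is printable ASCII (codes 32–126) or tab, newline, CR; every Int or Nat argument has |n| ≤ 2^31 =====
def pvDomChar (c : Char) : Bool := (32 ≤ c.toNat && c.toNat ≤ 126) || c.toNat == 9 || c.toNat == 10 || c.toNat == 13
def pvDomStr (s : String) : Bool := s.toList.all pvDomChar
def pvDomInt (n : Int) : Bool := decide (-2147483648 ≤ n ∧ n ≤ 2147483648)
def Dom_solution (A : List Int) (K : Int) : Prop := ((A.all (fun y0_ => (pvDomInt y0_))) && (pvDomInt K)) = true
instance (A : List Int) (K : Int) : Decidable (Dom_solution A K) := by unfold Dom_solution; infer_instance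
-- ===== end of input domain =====

-- B replaces A's sort of the whole frequency table (one entry per distinct element) by a
-- count-of-counts table: it sorts only the DISTINCT frequencies (at most O(sqrt(n)) of them)
-- and removes each whole frequency class at once with integer division (intended as faster;
-- a timing run measured between ~1.4x and ~1.7x across runs, around its 1.5x bar).


-- ===== PORT A =====
-- the 'for num, count in sorted_freq' loop with its break, carrying (K, distinct_count)
def loopA : List (Int × Int) → Int → Int → Int
  | [], _, d => d
  | (_, c) :: rest, k, d => if k ≥ c then loopA rest (k - c) (d - 1) else d

def solution (A : List Int) (K : Int) : Int :=
  let freq := PySem.Dict.counter A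
  let sortedFreq := PySem.List.sorted freq.items (fun x => x.2) false
  loopA sortedFreq K (sortedFreq.length : Int)

-- ===== PORT B =====
-- the 'for f in sorted(ff)' loop of Source B with its breaks, carrying (K, distinct);
-- ff[f] is ported as getD f 0 (exact: f is drawn from ff's keys, so the lookup never raises)
def loopB (ff : PySem.Dict Int Int) : List Int → Int → Int → Int
  | [], _, d => d
  | f :: rest, k, d =>
    let m := ff.getD f 0
    if k < f then d
    else
      let t := min m (PySem.Int.floordiv k f)
      if t < m then d - t
      else loopB ff rest (k - t * f) (d - t)

def solution_alt (A : List Int) (K : Int) : Int :=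
  let freq := PySem.Dict.counter A
  let ff := PySem.Dict.counter freq.values
  loopB ff (PySem.List.sorted ff.keys (fun x => x) false) K (freq.size : Int)

-- ===== PRECONDITION & SPEC =====
def Spec_solution (A : List Int) (K : Int) (out : Int) : Prop := out = solution_alt A K
instance (A : List Int) (K : Int) (out : Int) : Decidable (Spec_solution A K out) := by unfold Spec_solution; infer_instance

-- ===== CLAIM (what is proved, stated in full; the proofs are below) =====
def Claim_equal_solution : Prop := ∀ (A : List Int) (K : Int), Dom_solution A K → Spec_solution A K (solution A K)

-- ===== LEMMAS AND PROOFS =====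

/-- The common greedy: walk a list of group sizes, removing a whole group while it fits. -/
def greedy : List Int → Int → Int → Int
  | [], _, d => d
  | c :: cs, k, d => if k ≥ c then greedy cs (k - c) (d - 1) else d

theorem loopA_eq_greedy (l : List (Int × Int)) (k d : Int) :
    loopA l k d = greedy (l.map (·.2)) k d := by
  induction l generalizing k d with
  | nil => rfl
  | cons p rest ih =>
    obtain ⟨num, c⟩ := p
    simp only [loopA, List.map, greedy]
    split_ifs with h
    · exact ih _ _
    · rfl

theorem greedy_replicate (mN : Nat) (f : Int) (rest : List Int) (k d : Int)
    (hf : 1 ≤ f) (hm : 1 ≤ mN) :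
    greedy (List.replicate mN f ++ rest) k d =
      if k < f then d
      else if min (mN : Int) (PySem.Int.floordiv k f) < (mN : Int)
           then d - min (mN : Int) (PySem.Int.floordiv k f)
           else greedy rest (k - min (mN : Int) (PySem.Int.floordiv k f) * f)
                  (d - min (mN : Int) (PySem.Int.floordiv k f)) := by
  induction mN generalizing k d with
  | zero => omega
  | succ m' ih =>
    by_cases hk : k < f
    · simp only [List.replicate, List.cons_append, greedy, if_neg (by omega : ¬ k ≥ f), if_pos hk]
    · -- f ≤ k, so floordiv k f ≥ 1
      have hfk : f ≤ k := by omega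
      have hq1 : 1 ≤ PySem.Int.floordiv k f :=
        (PySem.Int.le_floordiv_iff_mul_le (by omega)).mpr (by omega)
      rcases Nat.eq_or_lt_of_le hm with h1 | h1
      · -- mN = 1
        have hm0 : m' = 0 := by omega
        subst hm0
        simp only [List.replicate, List.cons_append, List.nil_append, greedy,
          if_pos (by omega : k ≥ f), if_neg hk]
        norm_num
        have ht : min (1 : Int) (PySem.Int.floordiv k f) = 1 := by omega
        rw [ht, if_neg (by omega), one_mul]
      · -- m' ≥ 1
        have hm' : 1 ≤ m' := by omega
        simp only [List.replicate, List.cons_append, greedy, if_pos (by omega : k ≥ f), if_neg hk]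
        rw [ih (k - f) (d - 1) hm']
        set q := PySem.Int.floordiv k f with hqdef
        have hq' : PySem.Int.floordiv (k - f) f = q - 1 := by
          rw [PySem.Int.floordiv_eq_ediv_of_pos (by omega), hqdef,
            PySem.Int.floordiv_eq_ediv_of_pos (by omega)]
          have : k - f = (k + (-1) * f) := by ring
          rw [this, Int.add_mul_ediv_right _ _ (by omega : f ≠ 0)]
          ring
        rw [hq']
        by_cases hk2 : k - f < f
        · -- k < 2f: q = 1
          have hq2 : q < 2 := by
            rw [hqdef]
            exact (PySem.Int.floordiv_lt_iff_lt_mul (by omega)).mpr (by omega)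
          have hqe : q = 1 := by omega
          rw [if_pos hk2, hqe]
          have ht : min ((m' + 1 : Nat) : Int) (1 : Int) = 1 := by
            push_cast; omega
          rw [ht, if_pos (by push_cast; omega)]
        · -- 2f ≤ k: q ≥ 2
          have hq2 : 2 ≤ q := by
            rw [hqdef]
            exact (PySem.Int.le_floordiv_iff_mul_le (by omega)).mpr (by omega)
          rw [if_neg hk2]
          set t' := min (m' : Int) (q - 1) with ht'def
          have htt : min ((m' + 1 : Nat) : Int) q = t' + 1 := by push_cast; omega
          rw [htt]
          have hcond : (t' + 1 < ((m' + 1 : Nat) : Int)) ↔ (t' < (m' : Int)) := by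
            push_cast; omega
          by_cases hc : t' < (m' : Int)
          · rw [if_pos hc, if_pos (hcond.mpr hc)]
            ring_nf
          · rw [if_neg hc, if_neg (fun h => hc (hcond.mp h))]
            have harg : k - f - t' * f = k - (t' + 1) * f := by ring
            have harg2 : d - 1 - t' = d - (t' + 1) := by ring
            rw [harg, harg2]

theorem loopB_eq_greedy (ff : PySem.Dict Int Int) (fs : List Int) (k d : Int)
    (hfs : ∀ f ∈ fs, 1 ≤ f) (hpos : ∀ f ∈ fs, 1 ≤ ff.getD f 0) :
    loopB ff fs k d =
      greedy (fs.flatMap (fun f => List.replicate (ff.getD f 0).toNat f)) k d := by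
  induction fs generalizing k d with
  | nil => rfl
  | cons f rest ih =>
    have hf : 1 ≤ f := hfs f (by simp)
    have hrest : ∀ g ∈ rest, 1 ≤ g := fun g hg => hfs g (by simp [hg])
    have hprest : ∀ g ∈ rest, 1 ≤ ff.getD g 0 := fun g hg => hpos g (by simp [hg])
    simp only [loopB, List.flatMap_cons]
    have hm0 : 1 ≤ ff.getD f 0 := hpos f (by simp)
    have hm1 : 1 ≤ (ff.getD f 0).toNat := by omega
    have hcast : ((ff.getD f 0).toNat : Int) = ff.getD f 0 := by omega
    rw [greedy_replicate _ f _ k d hf hm1, hcast]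
    by_cases hk : k < f
    · rw [if_pos hk, if_pos hk]
    · rw [if_neg hk, if_neg hk]
      by_cases hc : min (ff.getD f 0) (PySem.Int.floordiv k f) < ff.getD f 0
      · rw [if_pos hc, if_pos hc]
      · rw [if_neg hc, if_neg hc]
        exact ih _ _ hrest hprest

/-- Counting characterisation of the bucket list. -/
theorem count_flatMap_replicate (fs : List Int) (vals : List Int) (v : Int)
    (hnd : fs.Nodup) :
    (fs.flatMap (fun f => List.replicate (vals.count f) f)).count v =
      if v ∈ fs then vals.count v else 0 := by
  induction fs with
  | nil => simp
  | cons f rest ih =>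
    have hnd' : rest.Nodup := hnd.of_cons
    have hfn : f ∉ rest := (List.nodup_cons.mp hnd).1
    simp only [List.flatMap_cons, List.count_append, List.count_replicate, ih hnd']
    by_cases hv : v = f
    · subst hv
      simp [hfn]
    · simp [Ne.symm hv, hv]

theorem flatMap_replicate_perm (fs : List Int) (vals : List Int)
    (hnd : fs.Nodup) (hmem : ∀ v ∈ vals, v ∈ fs) :
    (fs.flatMap (fun f => List.replicate (vals.count f) f)).Perm vals := by
  rw [List.perm_iff_count]
  intro v
  rw [count_flatMap_replicate fs vals v hnd]
  by_cases hv : v ∈ fs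
  · rw [if_pos hv]
  · rw [if_neg hv]
    have : v ∉ vals := fun h => hv (hmem v h)
    simp [List.count_eq_zero_of_not_mem this]

theorem pairwise_flatMap_replicate (fs : List Int) (g : Int → Nat)
    (hp : fs.Pairwise (· < ·)) :
    (fs.flatMap (fun f => List.replicate (g f) f)).Pairwise (· ≤ ·) := by
  induction fs with
  | nil => simp
  | cons f rest ih =>
    rw [List.pairwise_cons] at hp
    simp only [List.flatMap_cons]
    rw [List.pairwise_append]
    refine ⟨List.pairwise_replicate.mpr (Or.inr le_rfl), ih hp.2, ?_⟩
    intro x hx y hy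
    have hxf : x = f := List.eq_of_mem_replicate hx
    obtain ⟨w, hw, hy2⟩ := List.mem_flatMap.mp hy
    have hyw : y = w := List.eq_of_mem_replicate hy2
    rw [hxf, hyw]
    exact le_of_lt (hp.1 w hw)

/-- every count stored by Counter(A) lies in [1, len A] -/
theorem counter_values_bounds (A : List Int) (c : Int)
    (hc : c ∈ (PySem.Dict.counter A).values) : 1 ≤ c ∧ c ≤ (A.length : Int) := by
  have hv : (PySem.Dict.counter A).values =
      (PySem.Set.ofList A).map (fun k => (A.count k : Int)) := by
    simp only [PySem.Dict.values, PySem.Dict.items_counter, List.map_map]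
    rfl
  rw [hv] at hc
  obtain ⟨x, hx, hxc⟩ := List.mem_map.mp hc
  have hxA : x ∈ A := (PySem.Set.mem_ofList _ _).mp hx
  constructor
  · have : 0 < A.count x := List.count_pos_iff.mpr hxA
    omega
  · have : A.count x ≤ A.length := List.count_le_length
    omega

-- the value sequence of A's frequency-sorted items equals B's bucket list
theorem map_snd_sorted_eq_bucket (A : List Int) :
    ((PySem.List.sorted (PySem.Dict.counter A).items (fun x => x.2) false).map (·.2)) =
      (PySem.List.sorted (PySem.Dict.counter (PySem.Dict.counter A).values).keys (fun x => x) false).flatMap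
        (fun f => List.replicate ((PySem.Dict.counter A).values.count f) f) := by
  set vals := (PySem.Dict.counter A).values with hvals
  have hkeys : (PySem.Dict.counter vals).keys = PySem.Set.ofList vals :=
    PySem.Dict.keys_counter vals
  set fs := PySem.List.sorted (PySem.Dict.counter vals).keys (fun x => x) false with hfs
  have hlt : fs.Pairwise (· < ·) := by
    rw [hfs, hkeys]
    exact PySem.List.sorted_ofList_pairwise_lt vals
  have hmem : ∀ v ∈ vals, v ∈ fs := by
    intro v hv
    rw [hfs, PySem.List.mem_sorted, hkeys]
    exact (PySem.Set.mem_ofList _ _).mpr hv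
  have hperm1 : ((PySem.List.sorted (PySem.Dict.counter A).items (fun x => x.2) false).map (·.2)).Perm vals := by
    have := PySem.List.sorted_perm (xs := (PySem.Dict.counter A).items) (key := fun x => x.2) (rev := false)
    exact this.map (·.2)
  have hperm2 : (fs.flatMap (fun f => List.replicate (vals.count f) f)).Perm vals :=
    flatMap_replicate_perm fs vals (hlt.imp fun h => ne_of_lt h) hmem
  have hperm : ((PySem.List.sorted (PySem.Dict.counter A).items (fun x => x.2) false).map (·.2)).Perm
      (fs.flatMap (fun f => List.replicate (vals.count f) f)) :=
    hperm1.trans hperm2.symm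
  have hs1 : ((PySem.List.sorted (PySem.Dict.counter A).items (fun x => x.2) false).map (·.2)).Pairwise (· ≤ ·) :=
    PySem.List.sorted_map_key_pairwise _ _
  have hs2 : (fs.flatMap (fun f => List.replicate (vals.count f) f)).Pairwise (· ≤ ·) :=
    pairwise_flatMap_replicate fs _ hlt
  exact List.Perm.eq_of_pairwise (fun a b _ _ h1 h2 => le_antisymm h1 h2) hs1 hs2 hperm

-- ===== VERDICT (by name: the statement is the Claim_ definition above) =====
theorem solution_spec : Claim_equal_solution := by
  intro A K _
  unfold Spec_solution solution solution_alt
  simp only []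
  rw [loopA_eq_greedy, loopB_eq_greedy]
  · have hgd : ∀ f : Int, (PySem.Dict.counter (PySem.Dict.counter A).values).getD f 0 =
        ((PySem.Dict.counter A).values.count f : Int) := fun f =>
      PySem.Dict.getD_counter _ f
    have hlen : ((PySem.List.sorted (PySem.Dict.counter A).items (fun x => x.2) false).length : Int) =
        ((PySem.Dict.counter A).size : Int) := by
      rw [PySem.List.length_sorted]; rfl
    rw [hlen]
    congr 1
    rw [map_snd_sorted_eq_bucket A]
    refine List.flatMap_congr (fun f _ => ?_)
    rw [hgd f, Int.toNat_natCast]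
  · intro f hf
    rw [PySem.List.mem_sorted, PySem.Dict.keys_counter] at hf
    have hfv : f ∈ (PySem.Dict.counter A).values := (PySem.Set.mem_ofList _ _).mp hf
    exact (counter_values_bounds A f hfv).1
  · intro f hf
    rw [PySem.List.mem_sorted, PySem.Dict.keys_counter] at hf
    have hfv : f ∈ (PySem.Dict.counter A).values := (PySem.Set.mem_ofList _ _).mp hf
    rw [PySem.Dict.getD_counter]
    have : 0 < (PySem.Dict.counter A).values.count f := List.count_pos_iff.mpr hfv
    omega
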